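-- pv_equiv track=rewrite | github.com/HotBody-SingleBungle/HBSB-ALGO | HB/pysrc/프로그래머스/레벨1/Day2/부족한_금액_계산하기.py | solution
-- ===== SOURCE A (Python) =====
-- def solution(price, money, count):
--     answer = -1
--     sum_ = 0
--     for i in range(count+1):
--         sum_ += i
--     answer = -(money - sum_*price)
--     if answer <0:
--         answer = 0
--     return answer
-- ===== SOURCE B (Python) =====
-- def solution(price, money, count):
--     n = max(count, 0)
--     total = price * n * (n + 1) // 2
--     return max(total - money, 0)
-- ===== Notes on version B (the rewrite author's own statement) =====
-- stated objective: faster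
-- what changed: Replaces the O(count) summation loop with the closed-form triangular-number formula n*(n+1)//2 and a max.
import Mathlib
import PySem

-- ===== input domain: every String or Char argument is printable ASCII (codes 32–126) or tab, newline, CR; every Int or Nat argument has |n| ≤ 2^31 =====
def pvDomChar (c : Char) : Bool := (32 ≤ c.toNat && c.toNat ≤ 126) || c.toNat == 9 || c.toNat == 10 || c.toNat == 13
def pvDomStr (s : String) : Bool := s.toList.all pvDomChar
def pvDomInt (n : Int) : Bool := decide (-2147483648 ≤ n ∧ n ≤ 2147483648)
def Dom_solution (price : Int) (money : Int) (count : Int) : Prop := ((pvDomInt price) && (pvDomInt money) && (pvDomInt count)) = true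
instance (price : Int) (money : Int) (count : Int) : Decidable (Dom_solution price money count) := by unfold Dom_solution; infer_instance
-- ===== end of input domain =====

-- B replaces A's O(count) summation loop by the closed-form triangular formula (O(1)).


-- ===== PORT A =====
def solution (price : Int) (money : Int) (count : Int) : Int :=
  let sum_ : Int := (PySem.List.pyRange 0 (count + 1) 1).foldl (fun acc i => acc + i) 0
  let answer : Int := -(money - sum_ * price)
  if answer < 0 then 0 else answer

-- ===== PORT B =====
def solution_alt (price : Int) (money : Int) (count : Int) : Int :=
  let n : Int := max count 0
  let total : Int := PySem.Int.floordiv (price * n * (n + 1)) 2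
  max (total - money) 0

-- ===== PRECONDITION & SPEC =====
def Spec_solution (price : Int) (money : Int) (count : Int) (out : Int) : Prop := out = solution_alt price money count
instance (price : Int) (money : Int) (count : Int) (out : Int) : Decidable (Spec_solution price money count out) := by unfold Spec_solution; infer_instance

-- ===== CLAIM (what is proved, stated in full; the proofs are below) =====
def Claim_equal_solution : Prop := ∀ (price : Int) (money : Int) (count : Int), Dom_solution price money count → Spec_solution price money count (solution price money count)

-- ===== LEMMAS AND PROOFS =====

-- Sum of 0..k-1 via the loop, doubled: 2*S = k*(k-1).
lemma sum_pyRange_mul_two (k : Nat) :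
    ((PySem.List.pyRange 0 (k : Int) 1).foldl (fun acc i => acc + i) 0) * 2 = (k : Int) * ((k : Int) - 1) := by
  induction k with
  | zero => simp [PySem.List.pyRange_one_eq_nil]
  | succ k ih =>
    have h : PySem.List.pyRange 0 ((k : Int) + 1) 1
        = PySem.List.pyRange 0 (k : Int) 1 ++ [(k : Int)] :=
      PySem.List.pyRange_one_succ_right (by exact_mod_cast Nat.zero_le k)
    push_cast
    rw [h, List.foldl_append]
    simp only [List.foldl_cons, List.foldl_nil]
    linear_combination ih

lemma floordiv_mul_two (x : Int) : PySem.Int.floordiv (x * 2) 2 = x := by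
  rw [PySem.Int.floordiv_eq_ediv_of_pos (by norm_num)]
  exact Int.mul_ediv_cancel x (by norm_num)

-- ===== VERDICT (by name: the statement is the Claim_ definition above) =====
theorem solution_spec : Claim_equal_solution := by
  intro price money count _
  unfold Spec_solution solution solution_alt
  by_cases h : 0 ≤ count
  · have hk : count = ((count.toNat : Nat) : Int) := by omega
    have hsum := sum_pyRange_mul_two (count.toNat + 1)
    set S : Int := (PySem.List.pyRange 0 (count + 1) 1).foldl (fun acc i => acc + i) 0 with hS
    have hS2 : S * 2 = (count + 1) * count := by
      rw [hS, hk]; push_cast at hsum ⊢; linear_combination hsum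
    have hmax : max count 0 = count := by omega
    have htot : price * count * (count + 1) = (S * price) * 2 := by
      linear_combination (-price) * hS2
    simp only [hmax, htot, floordiv_mul_two]
    omega
  · have hnil : PySem.List.pyRange 0 (count + 1) 1 = [] :=
      PySem.List.pyRange_one_eq_nil (by omega)
    have hmax : max count 0 = 0 := by omega
    rw [hnil, hmax]
    simp only [List.foldl_nil, mul_zero, zero_mul]
    have : PySem.Int.floordiv 0 2 = 0 := by
      rw [PySem.Int.floordiv_eq_ediv_of_pos (by norm_num)]; norm_num
    rw [this]
    omega
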